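-- pv_equiv track=rewrite | github.com/DozzzeN/SKG | segmentation/test_interval.py | find_all_consecutive_subarrays
-- ===== SOURCE A (Python) =====
-- def find_all_consecutive_subarrays(arr):
--     if not arr:
--         return []
--
--     subarrays = []
--     start_index = 0
--
--     for i in range(1, len(arr)):
--         if arr[i] != arr[i - 1] + 1:
--             subarrays.append(arr[start_index:i])
--             start_index = i
--
--     # 最后一个子段
--     subarrays.append(arr[start_index:])
--
--     return subarrays
-- ===== SOURCE B (Python) =====
-- def find_all_consecutive_subarrays(arr):
--     # One pass with an explicit current-group accumulator (no index/slice bookkeeping).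
--     out = []
--     cur = []
--     for x in arr:
--         if cur and x != cur[-1] + 1:
--             out.append(cur)
--             cur = [x]
--         else:
--             cur.append(x)
--     if cur:
--         out.append(cur)
--     return out
-- ===== Notes on version B (the rewrite author's own statement) =====
-- stated objective: simpler
-- what changed: Replaces index-based boundary tracking with slicing by a single pass that grows the current group directly in an accumulator, so no indices or slices are used.
import Mathlib
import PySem

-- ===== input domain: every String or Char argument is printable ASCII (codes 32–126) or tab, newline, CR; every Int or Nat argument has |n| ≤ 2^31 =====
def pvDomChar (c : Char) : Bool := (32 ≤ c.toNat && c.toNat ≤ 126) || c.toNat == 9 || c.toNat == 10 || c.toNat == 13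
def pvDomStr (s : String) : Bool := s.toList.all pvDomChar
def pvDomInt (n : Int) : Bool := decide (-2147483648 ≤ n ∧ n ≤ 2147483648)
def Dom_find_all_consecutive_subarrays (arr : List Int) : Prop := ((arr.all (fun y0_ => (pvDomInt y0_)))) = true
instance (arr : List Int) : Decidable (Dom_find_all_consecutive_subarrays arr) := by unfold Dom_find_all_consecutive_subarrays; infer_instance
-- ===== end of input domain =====

-- ===== PORT A =====
def astep (arr : List Int) (s : List (List Int) × Int) (i : Int) : List (List Int) × Int :=
  if PySem.List.pyGetD arr i 0 ≠ PySem.List.pyGetD arr (i - 1) 0 + 1 then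
    (s.1 ++ [PySem.List.slice arr (some s.2) (some i)], i)
  else s

-- literal port of A: loop over range(1, len(arr)) tracking start_index, slicing at breaks
def find_all_consecutive_subarrays (arr : List Int) : List (List Int) :=
  if arr = [] then []
  else
    let st := (PySem.List.pyRange 1 (arr.length : Int) 1).foldl (astep arr) (([], 0) : List (List Int) × Int)
    st.1 ++ [PySem.List.slice arr (some st.2) none]

-- ===== PORT B =====
def bstep (s : List (List Int) × List Int) (x : Int) : List (List Int) × List Int :=
  if s.2 ≠ [] ∧ x ≠ s.2.getLast?.getD 0 + 1 then (s.1 ++ [s.2], [x])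
  else (s.1, s.2 ++ [x])

-- port of B: single pass growing the current group in an accumulator
def find_all_consecutive_subarrays_alt (arr : List Int) : List (List Int) :=
  let s := arr.foldl bstep ([], [])
  if s.2 = [] then s.1 else s.1 ++ [s.2]

-- ===== PRECONDITION & SPEC =====
def Spec_find_all_consecutive_subarrays (arr : List Int) (out : List (List Int)) : Prop := out = find_all_consecutive_subarrays_alt arr
instance (arr : List Int) (out : List (List Int)) : Decidable (Spec_find_all_consecutive_subarrays arr out) := by unfold Spec_find_all_consecutive_subarrays; infer_instance

-- ===== CLAIM (what is proved, stated in full; the proofs are below) =====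
def Claim_equal_find_all_consecutive_subarrays : Prop := ∀ (arr : List Int), Dom_find_all_consecutive_subarrays arr → Spec_find_all_consecutive_subarrays arr (find_all_consecutive_subarrays arr)

-- ===== LEMMAS AND PROOFS =====

-- the two loops, run from matching intermediate states, finish identically
theorem loop_eq_aux (arr : List Int) (k : Nat) : ∀ (i s : Nat) (acc : List (List Int)),
    arr.length - i = k → s < i → i ≤ arr.length →
    ((let st := (PySem.List.pyRange (i : Int) (arr.length : Int) 1).foldl (astep arr) (acc, (s : Int))
      st.1 ++ [PySem.List.slice arr (some st.2) none])
    = (let t := (arr.drop i).foldl bstep (acc, (arr.drop s).take (i - s))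
       if t.2 = [] then t.1 else t.1 ++ [t.2])) := by
  induction k with
  | zero =>
    intro i s acc hk hs hi
    have hin : i = arr.length := by omega
    subst hin
    rw [PySem.List.pyRange_one_eq_nil (le_refl _)]
    simp only [List.foldl_nil, List.drop_length]
    rw [PySem.List.slice_from_natCast]
    have hlen : ((arr.drop s).take (arr.length - s)).length = arr.length - s := by
      simp [List.length_take, List.length_drop]
    have hne : (arr.drop s).take (arr.length - s) ≠ [] := by
      intro hnil; rw [hnil] at hlen; simp at hlen; omega
    rw [if_neg hne]
    congr 2
    rw [List.take_of_length_le (by simp [List.length_drop])]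
  | succ k ih =>
    intro i s acc hk hs hi
    have hilt : i < arr.length := by omega
    rw [PySem.List.pyRange_one_cons (by exact_mod_cast hilt)]
    rw [List.drop_eq_getElem_cons hilt]
    simp only [List.foldl_cons]
    have hcurlen : ((arr.drop s).take (i - s)).length = i - s := by
      simp [List.length_take, List.length_drop]; omega
    have hcurne : (arr.drop s).take (i - s) ≠ [] := by
      intro hnil; rw [hnil] at hcurlen; simp at hcurlen; omega
    have hlast : ((arr.drop s).take (i - s)).getLast? = some (arr[i-1]'(by omega)) := by
      rw [List.getLast?_eq_getElem?, hcurlen]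
      rw [List.getElem?_take_of_lt (by omega), List.getElem?_drop]
      rw [List.getElem?_eq_getElem (by omega)]
      congr 1
      congr 1
      omega
    have hA : astep arr (acc, ((s : Nat) : Int)) ((i : Nat) : Int) =
        if arr[i] ≠ (arr[i-1]'(by omega)) + 1 then (acc ++ [(arr.drop s).take (i - s)], ((i : Nat) : Int))
        else (acc, ((s : Nat) : Int)) := by
      unfold astep
      have h1 : PySem.List.pyGetD arr ((i : Nat) : Int) 0 = arr[i] := by
        rw [PySem.List.pyGetD_natCast, List.getD_eq_getElem _ _ hilt]
      have h2 : PySem.List.pyGetD arr (((i : Nat) : Int) - 1) 0 = arr[i-1]'(by omega) := by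
        have hc : ((i : Nat) : Int) - 1 = (((i - 1 : Nat)) : Int) := by omega
        rw [hc, PySem.List.pyGetD_natCast, List.getD_eq_getElem _ _ (by omega)]
      rw [h1, h2, PySem.List.slice_natCast]
    have hB : bstep (acc, (arr.drop s).take (i - s)) (arr[i]'hilt) =
        if arr[i] ≠ (arr[i-1]'(by omega)) + 1 then (acc ++ [(arr.drop s).take (i - s)], [arr[i]'hilt])
        else (acc, (arr.drop s).take (i - s) ++ [arr[i]'hilt]) := by
      unfold bstep
      simp only [hlast, hcurne, Option.getD_some, ne_eq, not_false_eq_true, true_and]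
    rw [hA, hB]
    by_cases hcond : arr[i] ≠ (arr[i-1]'(by omega)) + 1
    · rw [if_pos hcond, if_pos hcond]
      have h1 : [arr[i]'hilt] = (arr.drop i).take ((i + 1) - i) := by
        have : (i + 1) - i = 1 := by omega
        rw [this, List.take_one, List.head?_drop]
        rw [List.getElem?_eq_getElem hilt]
        rfl
      rw [h1]
      exact ih (i + 1) i (acc ++ [(arr.drop s).take (i - s)]) (by omega) (by omega) (by omega)
    · rw [if_neg hcond, if_neg hcond]
      have h2 : (arr.drop s).take (i - s) ++ [arr[i]'hilt] = (arr.drop s).take ((i + 1) - s) := by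
        have hstep : (i + 1) - s = (i - s) + 1 := by omega
        rw [hstep, List.take_add_one]
        congr 1
        rw [List.getElem?_drop, List.getElem?_eq_getElem (by omega)]
        simp only [Option.toList_some]
        congr 2
        omega
      rw [h2]
      exact ih (i + 1) s acc (by omega) (by omega) (by omega)

theorem loop_eq (arr : List Int) (i s : Nat) (acc : List (List Int))
    (hs : s < i) (hi : i ≤ arr.length) :
    (let st := (PySem.List.pyRange (i : Int) (arr.length : Int) 1).foldl (astep arr) (acc, (s : Int))
     st.1 ++ [PySem.List.slice arr (some st.2) none])
    = (let t := (arr.drop i).foldl bstep (acc, (arr.drop s).take (i - s))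
       if t.2 = [] then t.1 else t.1 ++ [t.2]) :=
  loop_eq_aux arr (arr.length - i) i s acc rfl hs hi

-- ===== VERDICT (by name: the statement is the Claim_ definition above) =====
theorem find_all_consecutive_subarrays_spec : Claim_equal_find_all_consecutive_subarrays := by
  intro arr _
  unfold Spec_find_all_consecutive_subarrays find_all_consecutive_subarrays find_all_consecutive_subarrays_alt
  match arr with
  | [] => simp
  | a :: t =>
    have h := loop_eq (a :: t) 1 0 [] (by omega) (by simp)
    norm_num at h
    simp only [if_neg (List.cons_ne_nil a t), List.foldl_cons]
    have hb : bstep ([], []) a = ([], [a]) := by simp [bstep]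
    rw [hb]
    exact h
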